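-- pv_equiv track=rewrite | github.com/PedroLucas63/n-partition | python/include/partition.py | LS
-- ===== SOURCE A (Python) =====
-- from typing import List
-- import heapq
--
-- def LS(arr: List[int], n: int) -> List[List[int]]:
--    """
--    Partition a list of integers into n groups using a list scheduling algorithm.
--
--    The algorithm assigns each element to the subset with the current smallest sum.
--    This produces a reasonably balanced distribution, but not necessarily optimal.
--
--    Parameters
--    ----------
--    arr : List[int]
--       The list of integers to partition.
--    n : int
--       The number of groups to create.
--
--    Returns
--    -------
--    List[List[int]]
--       A list containing n groups (each subset is a list of integers).
--    """
--    if n <= 0: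
--       raise ValueError("n must be a positive integer")
--    if n == 1:
--       return [arr]
--
--    groups = [[] for _ in range(n)]
--    pq = [(0, i) for i in range(n)]
--    heapq.heapify(pq)
--
--    for x in arr:
--       sum, i = heapq.heappop(pq)
--       groups[i].append(x)
--       heapq.heappush(pq, (sum + x, i))
--
--    return groups
-- ===== SOURCE B (Python) =====
-- from typing import List
--
--
-- def LS(arr: List[int], n: int) -> List[List[int]]:
--     """Greedy list scheduling with a plain running-sum array instead of a heap:
--     for each element, linearly scan for the group with the smallest sum
--     (earliest index on ties, matching heapq's (sum, i) order) and put it there."""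
--     if n <= 0:
--         raise ValueError("n must be a positive integer")
--     if n == 1:
--         return [arr]
--
--     groups = [[] for _ in range(n)]
--     sums = [0] * n
--     for x in arr:
--         i = 0
--         for j in range(1, n):
--             if sums[j] < sums[i]:
--                 i = j
--         groups[i].append(x)
--         sums[i] += x
--     return groups
-- ===== Notes on version B (the rewrite author's own statement) =====
-- stated objective: simpler
-- what changed: Replaces the heapq priority queue of (sum, index) pairs with a plain list of running group sums and a linear earliest-min scan per element; the n<=0 ValueError (excluded by Pre_) and the n==1 fast path are kept.
-- outside the precondition, e.g. on LS([1, 2], 0): A raises ValueError, B raises ValueError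
import Mathlib
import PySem

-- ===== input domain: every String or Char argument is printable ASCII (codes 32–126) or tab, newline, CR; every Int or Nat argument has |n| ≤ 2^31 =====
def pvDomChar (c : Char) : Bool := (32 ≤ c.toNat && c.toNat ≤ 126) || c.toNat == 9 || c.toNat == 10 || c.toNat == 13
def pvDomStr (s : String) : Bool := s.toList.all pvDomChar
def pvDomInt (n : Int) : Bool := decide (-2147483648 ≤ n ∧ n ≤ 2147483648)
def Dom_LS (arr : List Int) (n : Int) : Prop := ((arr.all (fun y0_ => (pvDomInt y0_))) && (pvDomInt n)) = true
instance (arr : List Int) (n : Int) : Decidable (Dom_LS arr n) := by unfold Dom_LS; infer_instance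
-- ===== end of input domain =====

-- B replaces A's heapq priority queue with a plain running-sum list and a linear
-- earliest-min scan per element (simpler; same greedy result, same tie-breaking).

-- ===== PORT A =====
-- Python tuple comparison (s1, i1) < (s2, i2), as heapq uses it.
def pvLexLt (a b : Int × Int) : Bool :=
  decide (a.1 < b.1 ∨ (a.1 = b.1 ∧ a.2 < b.2))

def pvFindMin (a : Int × Int) (l : List (Int × Int)) : Int × Int :=
  l.foldl (fun best p => if pvLexLt p best then p else best) a

-- `heapq` is a library call, ported by its observable contract: `heappop` removes and
-- returns the smallest tuple (tuples here are pairwise distinct, so the minimum is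
-- unique and heap-internal order is unobservable in A's result), `heappush` adds one;
-- `heapify` of the already-sorted [(0,0),…,(0,n-1)] is a no-op.
def pvHeappop (pq : List (Int × Int)) : Option ((Int × Int) × List (Int × Int)) :=
  match pq with
  | [] => none
  | h :: t =>
    let m := pvFindMin h t
    some (m, (h :: t).erase m)

def pvStepA (st : List (List Int) × List (Int × Int)) (x : Int) :
    List (List Int) × List (Int × Int) :=
  match pvHeappop st.2 with
  | none => st
  | some ((s, i), rest) =>
    (st.1.modify i.toNat (fun g => g ++ [x]), rest ++ [(s + x, i)])

def LS (arr : List Int) (n : Int) : List (List Int) :=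
  if n ≤ 0 then []          -- Python raises ValueError here; excluded by Pre_LS
  else if n = 1 then [arr]
  else
    let groups : List (List Int) := (List.range n.toNat).map (fun _ => [])
    let pq : List (Int × Int) := (List.range n.toNat).map (fun i => ((0 : Int), (i : Int)))
    (arr.foldl pvStepA (groups, pq)).1

-- ===== PORT B =====
-- i = 0; for j in range(1, n): if sums[j] < sums[i]: i = j
def pvBestIdx (sums : List Int) (n : Nat) : Nat :=
  (List.range' 1 (n - 1)).foldl (fun i j => if sums.getD j 0 < sums.getD i 0 then j else i) 0

def pvStepB (n : Nat) (st : List (List Int) × List Int) (x : Int) :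
    List (List Int) × List Int :=
  let i := pvBestIdx st.2 n
  (st.1.modify i (fun g => g ++ [x]), st.2.modify i (fun s => s + x))

def LS_alt (arr : List Int) (n : Int) : List (List Int) :=
  if n ≤ 0 then []          -- Python raises ValueError here; excluded by Pre_LS
  else if n = 1 then [arr]
  else
    let groups : List (List Int) := (List.range n.toNat).map (fun _ => [])
    let sums : List Int := List.replicate n.toNat 0
    (arr.foldl (pvStepB n.toNat) (groups, sums)).1

-- ===== PRECONDITION & SPEC =====
-- Pre_ excludes exactly n ≤ 0, where A (and B) raise ValueError.
def Pre_LS (arr : List Int) (n : Int) : Prop := 1 ≤ n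
instance (arr : List Int) (n : Int) : Decidable (Pre_LS arr n) := by unfold Pre_LS; infer_instance
def pvWitness_LS : List Int × Int := ([3, 1, 4, 1, 5], 2)

def Spec_LS (arr : List Int) (n : Int) (out : List (List Int)) : Prop := out = LS_alt arr n
instance (arr : List Int) (n : Int) (out : List (List Int)) : Decidable (Spec_LS arr n out) := by unfold Spec_LS; infer_instance

-- ===== CLAIM (what is proved, stated in full; the proofs are below) =====
def Claim_equal_LS : Prop := ∀ (arr : List Int) (n : Int), Dom_LS arr n → Pre_LS arr n → Spec_LS arr n (LS arr n)

-- ===== LEMMAS AND PROOFS =====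

-- the multiset of (group sum, group index) pairs that A's priority queue holds
def pvPairs (sums : List Int) (k : Nat) : List (Int × Int) :=
  (sums.zipIdx k).map (fun p => (p.1, (p.2 : Int)))

theorem pvPairs_nil (k : Nat) : pvPairs [] k = [] := rfl

theorem pvPairs_cons (a : Int) (l : List Int) (k : Nat) :
    pvPairs (a :: l) k = (a, (k : Int)) :: pvPairs l (k + 1) := rfl

theorem length_pvPairs (l : List Int) (k : Nat) : (pvPairs l k).length = l.length := by
  simp [pvPairs]

theorem mem_pvPairs (sums : List Int) (k : Nat) (p : Int × Int) :
    p ∈ pvPairs sums k ↔ ∃ j, j < sums.length ∧ p = (sums.getD j 0, ((k + j : Nat) : Int)) := by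
  induction sums generalizing k with
  | nil => simp [pvPairs_nil]
  | cons a l ih =>
    rw [pvPairs_cons]
    simp only [List.mem_cons, ih (k + 1), List.length_cons]
    constructor
    · rintro (rfl | ⟨j, hj, rfl⟩)
      · exact ⟨0, by omega, by simp⟩
      · exact ⟨j + 1, by omega, by simp; omega⟩
    · rintro ⟨j, hj, rfl⟩
      cases j with
      | zero => left; simp
      | succ j => right; exact ⟨j, by omega, by simp; omega⟩

theorem pvLexLt_irrefl (p : Int × Int) : pvLexLt p p = false := by
  simp [pvLexLt]

theorem pvLexLt_total (p q : Int × Int) (h : p ≠ q) :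
    pvLexLt p q = true ∨ pvLexLt q p = true := by
  obtain ⟨p1, p2⟩ := p; obtain ⟨q1, q2⟩ := q
  simp only [pvLexLt, decide_eq_true_eq]
  rcases eq_or_ne p1 q1 with h1 | h1
  · subst h1
    have h2 : p2 ≠ q2 := fun hh => h (by rw [hh])
    omega
  · omega

theorem pvLexLt_helper1 (p a m : Int × Int) (h1 : pvLexLt p a = true)
    (h2 : pvLexLt p m = false) : pvLexLt a m = false := by
  obtain ⟨p1, p2⟩ := p; obtain ⟨a1, a2⟩ := a; obtain ⟨m1, m2⟩ := m
  simp only [pvLexLt, decide_eq_true_eq] at h1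
  simp only [pvLexLt, decide_eq_false_iff_not] at h2 ⊢
  omega

theorem pvLexLt_helper2 (p a m : Int × Int) (h1 : pvLexLt p a = false)
    (h2 : pvLexLt a m = false) : pvLexLt p m = false := by
  obtain ⟨p1, p2⟩ := p; obtain ⟨a1, a2⟩ := a; obtain ⟨m1, m2⟩ := m
  simp only [pvLexLt, decide_eq_false_iff_not] at *
  omega

theorem pvFindMin_spec (l : List (Int × Int)) (a : Int × Int) :
    pvFindMin a l ∈ a :: l ∧ ∀ y ∈ a :: l, pvLexLt y (pvFindMin a l) = false := by
  induction l generalizing a with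
  | nil =>
    constructor
    · exact List.mem_singleton.mpr rfl
    · intro y hy
      have hya : y = a := by simpa using hy
      rw [hya]
      simpa [pvFindMin] using pvLexLt_irrefl a
  | cons p t ih =>
    have hrw : pvFindMin a (p :: t) = pvFindMin (if pvLexLt p a then p else a) t := by
      simp [pvFindMin, List.foldl]
    obtain ⟨hmem, hmin⟩ := ih (if pvLexLt p a then p else a)
    rw [hrw]
    constructor
    · rcases List.mem_cons.mp hmem with h | h
      · rw [h]; split <;> simp
      · simp [h]
    · intro y hy
      have ha' := hmin _ (List.mem_cons_self ..)
      generalize hM : pvFindMin (if pvLexLt p a then p else a) t = M at ha' ⊢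
      rcases List.mem_cons.mp hy with hya | hy'
      · rw [hya]
        by_cases hc : pvLexLt p a = true
        · rw [if_pos hc] at ha'
          exact pvLexLt_helper1 p a M hc ha'
        · rw [if_neg hc] at ha'
          exact ha'
      rcases List.mem_cons.mp hy' with hyp | hyt
      · rw [hyp]
        by_cases hc : pvLexLt p a = true
        · rw [if_pos hc] at ha'
          exact ha'
        · rw [if_neg hc] at ha'
          have hc' : pvLexLt p a = false := by
            revert hc; cases pvLexLt p a <;> simp
          exact pvLexLt_helper2 p a M hc' ha'
      · have := hmin _ (List.mem_cons_of_mem _ hyt)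
        rw [hM] at this
        exact this

theorem pvBestIdx_aux (sums : List Int) (m : Nat) :
    ((List.range' 1 m).foldl (fun i j => if sums.getD j 0 < sums.getD i 0 then j else i) 0) ≤ m ∧
    ∀ j, j ≤ m →
      pvLexLt (sums.getD j 0, (j : Int))
        (sums.getD ((List.range' 1 m).foldl (fun i j => if sums.getD j 0 < sums.getD i 0 then j else i) 0) 0,
         (((List.range' 1 m).foldl (fun i j => if sums.getD j 0 < sums.getD i 0 then j else i) 0 : Nat) : Int)) = false := by
  induction m with
  | zero =>
    refine ⟨by simp, ?_⟩
    intro j hj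
    interval_cases j
    simp [pvLexLt]
  | succ m ih =>
    obtain ⟨hle, hmin⟩ := ih
    rw [List.range'_concat, List.foldl_append]
    set r := (List.range' 1 m).foldl (fun i j => if sums.getD j 0 < sums.getD i 0 then j else i) 0 with hr
    simp only [List.foldl_cons, List.foldl_nil]
    have h1m : 1 + 1 * m = m + 1 := by omega
    rw [h1m]
    by_cases hc : sums.getD (m + 1) 0 < sums.getD r 0
    · rw [if_pos hc]
      refine ⟨le_refl _, ?_⟩
      intro j hj
      rcases Nat.lt_or_ge j (m + 1) with h | h
      · have := hmin j (by omega)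
        simp only [pvLexLt, decide_eq_false_iff_not] at this ⊢
        omega
      · have hj' : j = m + 1 := by omega
        subst hj'; exact pvLexLt_irrefl _
    · rw [if_neg hc]
      refine ⟨by omega, ?_⟩
      intro j hj
      rcases Nat.lt_or_ge j (m + 1) with h | h
      · exact hmin j (by omega)
      · have hj' : j = m + 1 := by omega
        subst hj'
        simp only [pvLexLt, decide_eq_false_iff_not]
        push Not at hc
        intro habs
        rcases habs with h' | ⟨h1, h2⟩
        · omega
        · have : (r : Int) ≤ m := by exact_mod_cast Int.ofNat_le.mpr (by omega)
          omega

theorem pvBestIdx_spec (sums : List Int) (n : Nat) (hn : 1 ≤ n) :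
    pvBestIdx sums n < n ∧
    ∀ j, j < n →
      pvLexLt (sums.getD j 0, (j : Int)) (sums.getD (pvBestIdx sums n) 0, ((pvBestIdx sums n : Nat) : Int)) = false := by
  obtain ⟨h1, h2⟩ := pvBestIdx_aux sums (n - 1)
  unfold pvBestIdx
  exact ⟨by omega, fun j hj => h2 j (by omega)⟩

theorem pvPairs_erase_modify (sums : List Int) (k i : Nat) (x : Int) (hi : i < sums.length) :
    ((pvPairs sums k).erase (sums.getD i 0, ((k + i : Nat) : Int)) ++
        [(sums.getD i 0 + x, ((k + i : Nat) : Int))]).Perm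
      (pvPairs (sums.modify i (fun s => s + x)) k) := by
  induction sums generalizing k i with
  | nil => simp at hi
  | cons a l ih =>
    cases i with
    | zero =>
      have hmod : (a :: l).modify 0 (fun s => s + x) = (a + x) :: l := rfl
      rw [hmod, pvPairs_cons a l k, pvPairs_cons (a + x) l k]
      simp only [List.getD_cons_zero, Nat.add_zero]
      rw [List.erase_cons_head]
      exact List.perm_append_singleton _ _
    | succ i =>
      have hmod : (a :: l).modify (i + 1) (fun s => s + x) = a :: l.modify i (fun s => s + x) := rfl
      have hgd : (a :: l).getD (i + 1) 0 = l.getD i 0 := rfl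
      have hne : ¬((((a, (k : Int)) : Int × Int)) == (l.getD i 0, ((k + (i + 1) : Nat) : Int))) = true := by
        simp only [beq_iff_eq, Prod.mk.injEq, not_and]
        intro _ h2
        have : (k : Int) < ((k + (i + 1) : Nat) : Int) := by push_cast; omega
        omega
      rw [hmod, hgd, pvPairs_cons a l k, pvPairs_cons a (l.modify i (fun s => s + x)) k,
        List.erase_cons_tail hne, List.cons_append]
      refine List.Perm.cons _ ?_
      have hih := ih (k + 1) i (by simp at hi; omega)
      have hk : k + 1 + i = k + (i + 1) := by omega
      rw [hk] at hih
      exact hih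

-- the loop invariant: equal groups, pq a permutation of the (sum, index) pairs, fixed length
theorem pvStep_inv (N : Nat) (hN : 1 ≤ N) (x : Int) (g : List (List Int))
    (pq : List (Int × Int)) (sums : List Int)
    (hp : pq.Perm (pvPairs sums 0)) (hl : sums.length = N) :
    (pvStepA (g, pq) x).1 = (pvStepB N (g, sums) x).1 ∧
    (pvStepA (g, pq) x).2.Perm (pvPairs (pvStepB N (g, sums) x).2 0) ∧
    (pvStepB N (g, sums) x).2.length = N := by
  have hpqlen : pq.length = N := by rw [hp.length_eq, length_pvPairs, hl]
  obtain ⟨h, t, rfl⟩ : ∃ h t, pq = h :: t := by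
    cases pq with
    | nil => simp at hpqlen; omega
    | cons h t => exact ⟨h, t, rfl⟩
  obtain ⟨hm_mem, hm_min⟩ := pvFindMin_spec t h
  set m := pvFindMin h t with hmdef
  set i := pvBestIdx sums N with hidef
  obtain ⟨hiN, hi_min⟩ := pvBestIdx_spec sums N hN
  -- the popped minimum equals B's chosen pair
  have hm_pairs : m ∈ pvPairs sums 0 := hp.mem_iff.mp hm_mem
  have hm_min' : ∀ y ∈ pvPairs sums 0, pvLexLt y m = false := fun y hy =>
    hm_min y (hp.mem_iff.mpr hy)
  have hi_mem : ((sums.getD i 0, (i : Int)) : Int × Int) ∈ pvPairs sums 0 := by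
    rw [mem_pvPairs]
    exact ⟨i, by omega, by simp⟩
  have hmi : m = (sums.getD i 0, (i : Int)) := by
    obtain ⟨j, hj, hjm⟩ := (mem_pvPairs sums 0 m).mp hm_pairs
    simp only [Nat.zero_add] at hjm
    by_cases hij : m = (sums.getD i 0, (i : Int))
    · exact hij
    · rcases pvLexLt_total _ _ hij with hlt | hlt
      · rw [hjm] at hlt
        have := hi_min j (by omega)
        rw [this] at hlt; exact absurd hlt (by simp)
      · have := hm_min' _ hi_mem
        rw [this] at hlt; exact absurd hlt (by simp)
  -- unfold both steps
  have hstepA : pvStepA (g, h :: t) x =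
      (g.modify i (fun gr => gr ++ [x]), (h :: t).erase m ++ [(sums.getD i 0 + x, (i : Int))]) := by
    simp only [pvStepA, pvHeappop, hmdef.symm, hmi]
    simp [Int.toNat_natCast]
  have hstepB : pvStepB N (g, sums) x =
      (g.modify i (fun gr => gr ++ [x]), sums.modify i (fun s => s + x)) := rfl
  rw [hstepA, hstepB]
  refine ⟨rfl, ?_, by simp [hl]⟩
  have he : ((h :: t).erase m).Perm ((pvPairs sums 0).erase m) := hp.erase m
  have := pvPairs_erase_modify sums 0 i x (by omega)
  simp only [Nat.zero_add] at this
  rw [hmi] at he ⊢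
  exact (he.append_right _).trans this

theorem pvFold_inv (N : Nat) (hN : 1 ≤ N) (arr : List Int) (g : List (List Int))
    (pq : List (Int × Int)) (sums : List Int)
    (hp : pq.Perm (pvPairs sums 0)) (hl : sums.length = N) :
    (arr.foldl pvStepA (g, pq)).1 = (arr.foldl (pvStepB N) (g, sums)).1 := by
  induction arr generalizing g pq sums with
  | nil => rfl
  | cons x xs ih =>
    obtain ⟨h1, h2, h3⟩ := pvStep_inv N hN x g pq sums hp hl
    simp only [List.foldl_cons]
    rw [show pvStepA (g, pq) x =
        ((pvStepB N (g, sums) x).1, (pvStepA (g, pq) x).2) from by rw [← h1]]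
    exact ih _ _ _ h2 h3

theorem pvPairs_replicate (N k : Nat) :
    pvPairs (List.replicate N 0) k = (List.range' k N).map (fun i => ((0 : Int), (i : Int))) := by
  induction N generalizing k with
  | zero => simp [pvPairs_nil]
  | succ N ih => rw [List.replicate_succ, pvPairs_cons, ih (k + 1), List.range'_succ]; simp

-- ===== VERDICT (by name: the statement is the Claim_ definition above) =====
theorem LS_spec : Claim_equal_LS := by
  intro arr n _ hpre
  unfold Spec_LS LS LS_alt
  by_cases h0 : n ≤ 0
  · exact absurd hpre (by unfold Pre_LS at *; omega)
  rw [if_neg h0, if_neg h0]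
  by_cases h1 : n = 1
  · rw [if_pos h1, if_pos h1]
  rw [if_neg h1, if_neg h1]
  have hN : 1 ≤ n.toNat := by unfold Pre_LS at hpre; omega
  apply pvFold_inv n.toNat hN
  · rw [pvPairs_replicate, List.range_eq_range']
  · simp
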